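-- pv_equiv track=rewrite | github.com/elbow-jason/addressor | piper/preprocessing/__init__.py | deduplicate_substrings
-- ===== SOURCE A (Python) =====
-- def deduplicate(strings):
--     return list(set(strings))
--
-- def deduplicate_substrings(strings):
--     deduped = deduplicate(strings)
--     sorted_strings = sorted(deduped, key=lambda item: 0-len(item))
--     keepers = sorted_strings[:1]
--     for string in sorted_strings[1:]:
--         matched = False
--         for keeper in keepers:
--             if string in keeper:
--                 matched = True
--         if not matched:
--             keepers.append(string)
--     return keepers
-- ===== SOURCE B (Python) =====
-- def deduplicate_substrings(strings):
--     deduped = set(strings)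
--     sorted_strings = sorted(deduped, key=lambda s: -len(s))
--     return [s for s in sorted_strings
--             if not any(s in t for t in deduped if len(t) > len(s))]
-- ===== Notes on version B (the rewrite author's own statement) =====
-- stated objective: simpler
-- what changed: The incrementally grown keepers accumulator (each string scanned against the keepers kept so far) is replaced by a stateless comprehension that keeps a string iff it is not contained in any strictly longer string of the whole deduped set; transitivity of substring containment makes the two criteria agree.
import Mathlib
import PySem

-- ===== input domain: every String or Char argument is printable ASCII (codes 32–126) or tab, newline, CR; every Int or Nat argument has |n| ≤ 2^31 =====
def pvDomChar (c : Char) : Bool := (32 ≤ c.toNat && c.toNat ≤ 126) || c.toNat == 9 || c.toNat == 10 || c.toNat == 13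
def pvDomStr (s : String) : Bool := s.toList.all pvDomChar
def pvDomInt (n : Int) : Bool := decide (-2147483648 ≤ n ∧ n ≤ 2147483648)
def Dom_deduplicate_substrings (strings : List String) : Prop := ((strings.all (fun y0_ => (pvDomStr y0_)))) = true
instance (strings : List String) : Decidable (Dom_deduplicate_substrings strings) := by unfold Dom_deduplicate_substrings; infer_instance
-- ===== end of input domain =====

-- B replaces A's incrementally grown keepers accumulator by a stateless filter against all
-- strictly longer deduped strings (objective: simpler); the set/sorted steps are identical, so
-- the kept strings and their order coincide.

-- ===== PORT A =====
def deduplicate (strings : List String) : List String :=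
  PySem.Set.ofList strings

def deduplicate_substrings (strings : List String) : List String :=
  let deduped := deduplicate strings
  let sorted_strings := PySem.List.sorted deduped (fun item => 0 - PySem.Str.len item)
  let keepers := PySem.List.slice sorted_strings none (some 1)
  (PySem.List.slice sorted_strings (some 1) none).foldl
    (fun keepers string =>
      let matched := keepers.foldl
        (fun matched keeper => if PySem.Str.isIn string keeper then true else matched) false
      if !matched then keepers ++ [string] else keepers)
    keepers

-- ===== PORT B =====
def deduplicate_substrings_alt (strings : List String) : List String :=
  let deduped := PySem.Set.ofList strings
  let sorted_strings := PySem.List.sorted deduped (fun s => -PySem.Str.len s)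
  sorted_strings.filter (fun s =>
    ! deduped.any (fun t => decide (PySem.Str.len s < PySem.Str.len t) && PySem.Str.isIn s t))

-- ===== PRECONDITION & SPEC =====
def Spec_deduplicate_substrings (strings : List String) (out : List String) : Prop := out = deduplicate_substrings_alt strings
instance (strings : List String) (out : List String) : Decidable (Spec_deduplicate_substrings strings out) := by unfold Spec_deduplicate_substrings; infer_instance

-- ===== CLAIM (what is proved, stated in full; the proofs are below) =====
def Claim_equal_deduplicate_substrings : Prop := ∀ (strings : List String), Dom_deduplicate_substrings strings → Spec_deduplicate_substrings strings (deduplicate_substrings strings)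

-- ===== LEMMAS AND PROOFS =====

-- B's keep-predicate, relative to a reference list M
def pvKeep (M : List String) (s : String) : Bool :=
  ! M.any (fun t => decide (PySem.Str.len s < PySem.Str.len t) && PySem.Str.isIn s t)

-- A's loop body
def pvStep (keepers : List String) (string : String) : List String :=
  let matched := keepers.foldl
    (fun matched keeper => if PySem.Str.isIn string keeper then true else matched) false
  if !matched then keepers ++ [string] else keepers

lemma pvMatched_eq_any (s : String) (ks : List String) (b : Bool) :
    ks.foldl (fun matched keeper => if PySem.Str.isIn s keeper then true else matched) b
      = (b || ks.any (fun k => PySem.Str.isIn s k)) := by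
  induction ks generalizing b with
  | nil => simp
  | cons k ks ih =>
      simp only [List.foldl_cons, List.any_cons, ih]
      cases b <;> simp

lemma pvInfix_len_lt {s k : String} (hin : PySem.Str.isIn s k = true) (hne : s ≠ k)
    (hle : PySem.Str.len s ≤ PySem.Str.len k) : PySem.Str.len s < PySem.Str.len k := by
  rcases lt_or_eq_of_le hle with h | h
  · exact h
  · exfalso
    apply hne
    apply String.toList_inj.mp
    refine List.IsInfix.eq_of_length ((PySem.Str.isIn_iff_infix s k).mp hin) ?_
    have := h
    simp only [PySem.Str.len_eq] at this
    exact_mod_cast this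

-- the key exchange: with the prefix processed, A's "matched" test against the kept prefix
-- equals B's test against the whole list
lemma pvAny_keepers_eq (L pre suf : List String) (s : String)
    (hL : L = pre ++ s :: suf) (hnd : L.Nodup)
    (hpw : L.Pairwise (fun a b => PySem.Str.len b ≤ PySem.Str.len a)) :
    (pre.filter (pvKeep L)).any (fun k => PySem.Str.isIn s k) = ! pvKeep L s := by
  subst hL
  rw [List.pairwise_append] at hpw
  obtain ⟨hpre, hcons, hcross⟩ := hpw
  have hsnotpre : s ∉ pre := by
    have hm := List.nodup_middle.mp hnd
    intro hs
    exact (List.nodup_cons.mp hm).1 (List.mem_append_left _ hs)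
  simp only [pvKeep, Bool.not_not]
  rw [Bool.eq_iff_iff, List.any_eq_true, List.any_eq_true]
  constructor
  · rintro ⟨k, hkmem, hkin⟩
    have hkpre := List.mem_of_mem_filter hkmem
    refine ⟨k, by simp [hkpre], ?_⟩
    have hne : s ≠ k := fun h => hsnotpre (h ▸ hkpre)
    have hle : PySem.Str.len s ≤ PySem.Str.len k :=
      hcross k hkpre s List.mem_cons_self
    rw [Bool.and_eq_true, decide_eq_true_eq]
    exact ⟨pvInfix_len_lt hkin hne hle, hkin⟩
  · rintro ⟨t, htmem, htprop⟩
    simp only [Bool.and_eq_true, decide_eq_true_eq] at htprop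
    -- the set of strings strictly longer than s containing s, in list order
    set C := (pre ++ s :: suf).filter
      (fun u => decide (PySem.Str.len s < PySem.Str.len u) && PySem.Str.isIn s u) with hC
    have htC : t ∈ C := by
      rw [hC, List.mem_filter]
      refine ⟨htmem, ?_⟩
      rw [Bool.and_eq_true, decide_eq_true_eq]
      exact htprop
    obtain ⟨u, C', hCu⟩ : ∃ u C', C = u :: C' := by
      cases h : C with
      | nil => rw [h] at htC; cases htC
      | cons u C' => exact ⟨u, C', rfl⟩
    have huC : u ∈ C := by rw [hCu]; exact List.mem_cons_self
    have huprop : PySem.Str.len s < PySem.Str.len u ∧ PySem.Str.isIn s u = true := by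
      have := (List.mem_filter.mp (hC ▸ huC)).2
      simpa using this
    have humem : u ∈ pre ++ s :: suf := List.mem_of_mem_filter (hC ▸ huC)
    -- u has maximal length in C (C is a filter of a length-descending list)
    have hCpw : C.Pairwise (fun a b => PySem.Str.len b ≤ PySem.Str.len a) := by
      rw [hC]
      refine List.Pairwise.filter _ ?_
      rw [List.pairwise_append]
      exact ⟨hpre, hcons, hcross⟩
    have humax : ∀ v ∈ C, PySem.Str.len v ≤ PySem.Str.len u := by
      intro v hv
      rw [hCu] at hv hCpw
      rw [List.mem_cons] at hv
      rcases hv with hv | hv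
      · exact le_of_eq (hv ▸ rfl)
      · exact (List.pairwise_cons.mp hCpw).1 v hv
    -- u itself is kept
    have hkeepu : pvKeep (pre ++ s :: suf) u = true := by
      simp only [pvKeep, Bool.not_eq_true', List.any_eq_false]
      intro v hv
      by_cases hlt : PySem.Str.len u < PySem.Str.len v
      · have hin : PySem.Str.isIn u v = false := by
          rw [Bool.eq_false_iff]
          intro hin
          have hsv : PySem.Str.isIn s v = true := by
            rw [PySem.Str.isIn_iff_infix]
            exact List.IsInfix.trans ((PySem.Str.isIn_iff_infix s u).mp huprop.2)
              ((PySem.Str.isIn_iff_infix u v).mp hin)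
          have hvC : v ∈ C := by
            rw [hC, List.mem_filter]
            refine ⟨hv, ?_⟩
            rw [Bool.and_eq_true, decide_eq_true_eq]
            exact ⟨lt_trans huprop.1 hlt, hsv⟩
          exact absurd (humax v hvC) (not_le.mpr hlt)
        rw [hin, Bool.and_false]
        exact Bool.false_ne_true
      · rw [decide_eq_false hlt, Bool.false_and]
        exact Bool.false_ne_true
    -- u lies in the processed prefix
    have hupre : u ∈ pre := by
      rcases List.mem_append.mp humem with h | h
      · exact h
      · exfalso
        rw [List.mem_cons] at h
        rcases h with h | h
        · exact absurd huprop.1 (by simp [h])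
        · have := (List.pairwise_cons.mp hcons).1 u h
          exact absurd huprop.1 (not_lt.mpr this)
    exact ⟨u, List.mem_filter.mpr ⟨hupre, hkeepu⟩, huprop.2⟩

lemma pvLoop_eq (L : List String) (hnd : L.Nodup)
    (hpw : L.Pairwise (fun a b => PySem.Str.len b ≤ PySem.Str.len a)) :
    ∀ suf pre, L = pre ++ suf →
      suf.foldl pvStep (pre.filter (pvKeep L)) = L.filter (pvKeep L) := by
  intro suf
  induction suf with
  | nil => intro pre h; simp [h]
  | cons s suf ih =>
      intro pre h
      have hstep : pvStep (pre.filter (pvKeep L)) s = (pre ++ [s]).filter (pvKeep L) := by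
        simp only [pvStep, pvMatched_eq_any, Bool.false_or,
          pvAny_keepers_eq L pre suf s h hnd hpw, Bool.not_not, List.filter_append,
          List.filter_cons, List.filter_nil]
        by_cases hk : pvKeep L s = true <;> simp [hk]
      rw [List.foldl_cons, hstep]
      exact ih (pre ++ [s]) (by simp [h])

lemma pvHead_keep (h : String) (tl L : List String)
    (hL : L = h :: tl)
    (hpw : L.Pairwise (fun a b => PySem.Str.len b ≤ PySem.Str.len a)) :
    pvKeep L h = true := by
  subst hL
  simp only [pvKeep, Bool.not_eq_true', List.any_eq_false]
  intro v hv
  rw [List.mem_cons] at hv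
  rcases hv with hv | hv
  · rw [decide_eq_false (by rw [hv]; exact lt_irrefl _), Bool.false_and]
    exact Bool.false_ne_true
  · have hle := (List.pairwise_cons.mp hpw).1 v hv
    rw [decide_eq_false (not_lt.mpr hle), Bool.false_and]
    exact Bool.false_ne_true

-- ===== VERDICT (by name: the statement is the Claim_ definition above) =====
theorem deduplicate_substrings_spec : Claim_equal_deduplicate_substrings := by
  intro strings _
  unfold Spec_deduplicate_substrings deduplicate_substrings deduplicate_substrings_alt deduplicate
  simp only [zero_sub]
  set D := PySem.Set.ofList strings with hD
  set key : String → Int := fun s => -PySem.Str.len s with hkey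
  set L := PySem.List.sorted D key with hLdef
  have hperm : L.Perm D := PySem.List.sorted_perm D key false
  have hnd : L.Nodup := hperm.nodup_iff.mpr (PySem.Set.nodup_ofList strings)
  have hpw : L.Pairwise (fun a b => PySem.Str.len b ≤ PySem.Str.len a) := by
    have := PySem.List.sorted_pairwise D key
    refine this.imp ?_
    intro a b hab
    simpa [hkey, neg_le_neg_iff] using hab
  -- B's predicate over D equals pvKeep over L
  have hpred : ∀ s, (! D.any (fun t => decide (PySem.Str.len s < PySem.Str.len t)
      && PySem.Str.isIn s t)) = pvKeep L s := by
    intro s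
    simp only [pvKeep, List.Perm.any_eq hperm]
  -- slices
  rw [PySem.List.slice_from_one,
      show PySem.List.slice L none (some 1) = L.take 1 by
        simpa using PySem.List.slice_to_natCast L 1]
  cases hLc : L with
  | nil => simp
  | cons h tl =>
      have hkh : pvKeep L h = true := pvHead_keep h tl L hLc hpw
      have hfilh : [h] = [h].filter (pvKeep L) := by simp [hkh]
      have hloop := pvLoop_eq L hnd hpw tl [h] hLc
      show List.foldl pvStep (List.take 1 (h :: tl)) ((h :: tl).tail)
        = List.filter (fun s => ! D.any (fun t =>
            decide (PySem.Str.len s < PySem.Str.len t) && PySem.Str.isIn s t)) (h :: tl)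
      rw [show List.take 1 (h :: tl) = [h] from rfl, List.tail_cons, hfilh, hloop, hLc]
      apply List.filter_congr
      intro x hx
      rw [hpred x, ← hLc]
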